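-- pv_equiv track=rewrite | github.com/aastafiev/other | odometer/interpolate_data.py | calc_exp_work_type
-- ===== SOURCE A (Python) =====
-- def calc_exp_work_type(value):
--     work_types = {'M-15': (12000, 18000),
--                   'M-30': (28000, 32000),
--                   'M-40': (39000, 41000),
--                   'M-45': (43500, 48500),
--                   'M-50': (49000, 51000),
--                   'M-60': (58000, 62000),
--                   'M-70': (69000, 71500),
--                   'M-75': (73000, 77500),
--                   'M-80': (79000, 81000),
--                   'M-90': (88500, 92000),
--                   'M-100': (99000, 101500),
--                   'M-105': (103500, 107000),
--                   'M-110': (109000, 111000),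
--                   'M-120': (119000, 121500),
--                   'M-130': (129000, 131500),
--                   'M-135': (134000, 138000),
--                   'M-140': (139000, 142000),
--                   'M-150': (148000, 152500)}
--
--     for key, (segment_start, segment_end) in work_types.items():
--         if segment_start <= value <= segment_end:
--             return key
--
--     return None
-- ===== SOURCE B (Python) =====
-- def calc_exp_work_type(value):
--     keys = ['M-15', 'M-30', 'M-40', 'M-45', 'M-50', 'M-60', 'M-70', 'M-75',
--             'M-80', 'M-90', 'M-100', 'M-105', 'M-110', 'M-120', 'M-130',
--             'M-135', 'M-140', 'M-150']
--     starts = [12000, 28000, 39000, 43500, 49000, 58000, 69000, 73000,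
--               79000, 88500, 99000, 103500, 109000, 119000, 129000,
--               134000, 139000, 148000]
--     ends = [18000, 32000, 41000, 48500, 51000, 62000, 71500, 77500,
--             81000, 92000, 101500, 107000, 111000, 121500, 131500,
--             138000, 142000, 152500]
--     # binary search: rightmost interval whose start is <= value
--     lo, hi = 0, len(starts)
--     while lo < hi:
--         mid = (lo + hi) // 2
--         if starts[mid] <= value:
--             lo = mid + 1
--         else:
--             hi = mid
--     i = lo - 1
--     if i >= 0 and value <= ends[i]:
--         return keys[i]
--     return None
-- ===== Notes on version B (the rewrite author's own statement) =====
-- stated objective: alternative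
-- what changed: Replaces the linear scan over the dict of 18 intervals with sorted parallel boundary arrays and a hand-written binary search (bisect_right on starts) followed by a single end-bound check.
import Mathlib
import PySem

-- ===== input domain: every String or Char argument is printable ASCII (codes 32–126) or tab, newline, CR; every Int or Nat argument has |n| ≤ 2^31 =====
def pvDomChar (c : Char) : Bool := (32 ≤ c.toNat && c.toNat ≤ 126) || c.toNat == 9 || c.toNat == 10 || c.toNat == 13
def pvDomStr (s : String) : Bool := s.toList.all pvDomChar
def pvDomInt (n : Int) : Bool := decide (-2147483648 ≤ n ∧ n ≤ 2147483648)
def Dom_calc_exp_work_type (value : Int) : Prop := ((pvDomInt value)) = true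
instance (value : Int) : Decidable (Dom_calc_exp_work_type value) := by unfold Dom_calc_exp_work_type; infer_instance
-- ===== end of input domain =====

-- B replaces A's linear scan of the interval dict with sorted boundary arrays and a hand-written binary search (alternative decomposition, same result).

-- ===== PORT A =====
-- the dict literal of A, in insertion order, as (key, (start, end)) items
def pvWorkTypes : List (String × Int × Int) :=
  [("M-15", 12000, 18000), ("M-30", 28000, 32000), ("M-40", 39000, 41000),
   ("M-45", 43500, 48500), ("M-50", 49000, 51000), ("M-60", 58000, 62000),
   ("M-70", 69000, 71500), ("M-75", 73000, 77500), ("M-80", 79000, 81000),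
   ("M-90", 88500, 92000), ("M-100", 99000, 101500), ("M-105", 103500, 107000),
   ("M-110", 109000, 111000), ("M-120", 119000, 121500), ("M-130", 129000, 131500),
   ("M-135", 134000, 138000), ("M-140", 139000, 142000), ("M-150", 148000, 152500)]

-- the 'for key, (segment_start, segment_end) in work_types.items()' loop with early return
def pvScan (value : Int) : List (String × Int × Int) → Option String
  | [] => none
  | (k, s, e) :: rest => if s ≤ value ∧ value ≤ e then some k else pvScan value rest

def calc_exp_work_type (value : Int) : Option String := pvScan value pvWorkTypes

-- ===== PORT B =====
def pvKeys : List String :=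
  ["M-15", "M-30", "M-40", "M-45", "M-50", "M-60", "M-70", "M-75", "M-80",
   "M-90", "M-100", "M-105", "M-110", "M-120", "M-130", "M-135", "M-140", "M-150"]
def pvStarts : List Int :=
  [12000, 28000, 39000, 43500, 49000, 58000, 69000, 73000, 79000,
   88500, 99000, 103500, 109000, 119000, 129000, 134000, 139000, 148000]
def pvEnds : List Int :=
  [18000, 32000, 41000, 48500, 51000, 62000, 71500, 77500, 81000,
   92000, 101500, 107000, 111000, 121500, 131500, 138000, 142000, 152500]

-- the 'while lo < hi' binary-search loop of Source B; the fuel parameter only makes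
-- the loop total (hi - lo shrinks every iteration, so fuel 18 always suffices)
def pvBisect (value : Int) : Nat → Nat → Nat → Nat
  | 0, lo, _ => lo
  | fuel + 1, lo, hi =>
    if lo < hi then
      let mid := (lo + hi) / 2
      if pvStarts.getD mid 0 ≤ value then pvBisect value fuel (mid + 1) hi
      else pvBisect value fuel lo mid
    else lo

def calc_exp_work_type_alt (value : Int) : Option String :=
  let lo := pvBisect value 18 0 18
  if 1 ≤ lo ∧ value ≤ pvEnds.getD (lo - 1) 0 then some (pvKeys.getD (lo - 1) "")
  else none

-- ===== PRECONDITION & SPEC =====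
def Spec_calc_exp_work_type (value : Int) (out : Option String) : Prop := out = calc_exp_work_type_alt value
instance (value : Int) (out : Option String) : Decidable (Spec_calc_exp_work_type value out) := by unfold Spec_calc_exp_work_type; infer_instance

-- ===== CLAIM (what is proved, stated in full; the proofs are below) =====
def Claim_equal_calc_exp_work_type : Prop := ∀ (value : Int), Dom_calc_exp_work_type value → Spec_calc_exp_work_type value (calc_exp_work_type value)

-- ===== LEMMAS AND PROOFS =====

-- A's scan, fully unfolded over the dict literal (definitionally equal to it)
def pvRef (v : Int) : Option String :=
  if 12000 ≤ v ∧ v ≤ 18000 then some "M-15" else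
  if 28000 ≤ v ∧ v ≤ 32000 then some "M-30" else
  if 39000 ≤ v ∧ v ≤ 41000 then some "M-40" else
  if 43500 ≤ v ∧ v ≤ 48500 then some "M-45" else
  if 49000 ≤ v ∧ v ≤ 51000 then some "M-50" else
  if 58000 ≤ v ∧ v ≤ 62000 then some "M-60" else
  if 69000 ≤ v ∧ v ≤ 71500 then some "M-70" else
  if 73000 ≤ v ∧ v ≤ 77500 then some "M-75" else
  if 79000 ≤ v ∧ v ≤ 81000 then some "M-80" else
  if 88500 ≤ v ∧ v ≤ 92000 then some "M-90" else
  if 99000 ≤ v ∧ v ≤ 101500 then some "M-100" else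
  if 103500 ≤ v ∧ v ≤ 107000 then some "M-105" else
  if 109000 ≤ v ∧ v ≤ 111000 then some "M-110" else
  if 119000 ≤ v ∧ v ≤ 121500 then some "M-120" else
  if 129000 ≤ v ∧ v ≤ 131500 then some "M-130" else
  if 134000 ≤ v ∧ v ≤ 138000 then some "M-135" else
  if 139000 ≤ v ∧ v ≤ 142000 then some "M-140" else
  if 148000 ≤ v ∧ v ≤ 152500 then some "M-150" else none

theorem pvScan_eq_ref (v : Int) : pvScan v pvWorkTypes = pvRef v := rfl

-- the interval starts are strictly increasing, so start lookups are monotone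
theorem pvStarts_mono : ∀ i j : Nat, i ≤ j → j < 18 →
    pvStarts.getD i 0 ≤ pvStarts.getD j 0 := by
  have hp : pvStarts.Pairwise (· ≤ ·) := by decide
  intro i j hij hj
  rcases eq_or_lt_of_le hij with rfl | hlt
  · exact le_refl _
  · have hlen : pvStarts.length = 18 := by decide
    have := (List.pairwise_iff_getElem.mp hp) i j (by omega) (by omega) hlt
    simpa [List.getD, List.getElem?_eq_getElem, hlen, (by omega : i < 18), (by omega : j < 18)]
      using this

-- binary-search invariant: the loop returns the partition point of `value`
-- within [lo, hi): every start strictly below the result is ≤ value, every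
-- start from the result up to index 18 is > value.
theorem pvBisect_char (v : Int) : ∀ (fuel lo hi : Nat), lo ≤ hi → hi ≤ 18 → hi - lo ≤ fuel →
    (∀ i, i < lo → pvStarts.getD i 0 ≤ v) →
    (∀ i, hi ≤ i → i < 18 → v < pvStarts.getD i 0) →
    pvBisect v fuel lo hi ≤ 18 ∧
    (∀ i, i < pvBisect v fuel lo hi → pvStarts.getD i 0 ≤ v) ∧
    (∀ i, pvBisect v fuel lo hi ≤ i → i < 18 → v < pvStarts.getD i 0) := by
  intro fuel
  induction fuel with
  | zero =>
    intro lo hi hle h18 hfuel hlow hhigh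
    simp only [pvBisect]
    exact ⟨by omega, hlow, fun i hi' h' => hhigh i (by omega) h'⟩
  | succ fuel ih =>
    intro lo hi hle h18 hfuel hlow hhigh
    by_cases hlt : lo < hi
    · simp only [pvBisect, if_pos hlt]
      by_cases hc : pvStarts.getD ((lo + hi) / 2) 0 ≤ v
      · simp only [if_pos hc]
        refine ih ((lo + hi) / 2 + 1) hi (by omega) h18 (by omega) ?_ hhigh
        intro i hi'
        by_cases hil : i < lo
        · exact hlow i hil
        · exact le_trans (pvStarts_mono i ((lo + hi) / 2) (by omega) (by omega)) hc
      · simp only [if_neg hc]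
        refine ih lo ((lo + hi) / 2) (by omega) (by omega) (by omega) hlow ?_
        intro i hi' h'
        by_cases hih : hi ≤ i
        · exact hhigh i hih h'
        · exact lt_of_lt_of_le (lt_of_not_ge hc) (pvStarts_mono ((lo + hi) / 2) i hi' (by omega))
    · simp only [pvBisect, if_neg hlt]
      exact ⟨by omega, hlow, fun i hi' h' => hhigh i (by omega) h'⟩

-- ===== VERDICT (by name: the statement is the Claim_ definition above) =====
set_option maxHeartbeats 4000000 in
theorem calc_exp_work_type_spec : Claim_equal_calc_exp_work_type := by
  intro v _
  unfold Spec_calc_exp_work_type calc_exp_work_type calc_exp_work_type_alt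
  obtain ⟨hle, h1, h2⟩ := pvBisect_char v 18 0 18 (by omega) (by omega) (by omega)
    (fun i hi => absurd hi (Nat.not_lt_zero i))
    (fun i h18 hi => absurd (lt_of_le_of_lt h18 hi) (lt_irrefl 18))
  rw [pvScan_eq_ref]
  set r := pvBisect v 18 0 18 with hr
  have hlo : r = 0 ∨ pvStarts.getD (r - 1) 0 ≤ v := by
    rcases Nat.eq_zero_or_pos r with h | h
    · exact Or.inl h
    · exact Or.inr (h1 (r - 1) (by omega))
  have hhi : r = 18 ∨ v < pvStarts.getD r 0 := by
    rcases eq_or_lt_of_le hle with h | h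
    · exact Or.inl h
    · exact Or.inr (h2 r le_rfl h)
  clear h1 h2 hr
  clear_value r
  interval_cases r <;>
    simp only [pvStarts, pvEnds, pvKeys, List.getD, List.getElem?_cons_zero,
      List.getElem?_cons_succ, List.getElem?_nil, Option.getD_some, Option.getD_none,
      Nat.reduceSub] at * <;>
    rcases hlo with hlo | hlo <;> rcases hhi with hhi | hhi <;>
    first
      | exact absurd hlo (by omega)
      | exact absurd hhi (by omega)
      | (split <;> rename_i hc <;>
          first
            | exact absurd hc (by omega)
            | (unfold pvRef
               repeat first | rw [if_pos (by omega)] | rw [if_neg (by omega)]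
               try rfl))
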